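-- pv_equiv track=rewrite | github.com/antonk404/quiz-solver-stepik | src/stepik/solvers.py | _find_option_index
-- ===== SOURCE A (Python) =====
-- def _find_option_index(
--     target: str,
--     options: list[str],
--     used: set[int],
-- ) -> int | None:
--     """Ищет индекс совпадения: сначала точное, потом по регистру."""
--     for j, option in enumerate(options):
--         if j not in used and option == target:
--             return j
--
--     lower_target = target.lower()
--     for j, option in enumerate(options):
--         if j not in used and option.lower() == lower_target:
--             return j
--
--     # Fuzzy: содержание (для случаев с лишними пробелами)
--     stripped = target.strip().lower()
--     for j, option in enumerate(options):
--         if j not in used and option.strip().lower() == stripped: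
--             return j
--
--     return None
-- ===== SOURCE B (Python) =====
-- def _find_option_index(
--     target: str,
--     options: list[str],
--     used: set[int],
-- ) -> int | None:
--     """Single pass: rank each unused option (1 exact, 2 case-insensitive,
--     3 stripped case-insensitive), keep the earliest option of the best rank."""
--     lower_target = target.lower()
--     stripped = target.strip().lower()
--     best_rank = 4
--     best_j = None
--     for j, option in enumerate(options):
--         if j in used:
--             continue
--         if option == target:
--             return j
--         elif option.lower() == lower_target:
--             rank = 2
--         elif option.strip().lower() == stripped:
--             rank = 3
--         else:
--             continue
--         if rank < best_rank:
--             best_rank = rank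
--             best_j = j
--     return best_j
-- ===== Notes on version B (the rewrite author's own statement) =====
-- stated objective: alternative
-- what changed: Replaces A's three sequential full passes over options (exact, lowercased, stripped+lowercased tiers) by a single pass that ranks each unused option once with an elif chain and keeps the earliest option of the best rank, returning immediately on an exact match.
import Mathlib
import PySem

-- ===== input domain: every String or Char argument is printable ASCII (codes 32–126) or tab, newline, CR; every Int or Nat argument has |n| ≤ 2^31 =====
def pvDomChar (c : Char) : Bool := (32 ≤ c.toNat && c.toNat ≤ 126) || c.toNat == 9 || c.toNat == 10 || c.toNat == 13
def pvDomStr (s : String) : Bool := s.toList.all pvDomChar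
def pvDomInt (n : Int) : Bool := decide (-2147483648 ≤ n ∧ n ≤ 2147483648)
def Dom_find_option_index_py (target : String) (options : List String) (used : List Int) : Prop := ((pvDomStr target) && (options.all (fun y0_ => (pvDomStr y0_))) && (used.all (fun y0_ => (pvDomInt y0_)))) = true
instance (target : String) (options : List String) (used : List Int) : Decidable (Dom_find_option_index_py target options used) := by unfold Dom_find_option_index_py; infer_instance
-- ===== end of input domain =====

-- B replaces A's three sequential tier passes over options by a single ranked pass (earliest best-rank candidate, early return on exact match); alternative decomposition, same asymptotic cost.


-- ===== PORT A =====
-- A's three for-loops are each a first-match scan over enumerate(options); this helper is that scan.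
def pvScanA (used : List Int) (p : String → Bool) : Nat → List String → Option Int
  | _, [] => none
  | j, o :: rest =>
    if !(used.contains (j : Int)) && p o then some (j : Int)
    else pvScanA used p (j + 1) rest

def find_option_index_py (target : String) (options : List String) (used : List Int) : Option Int :=
  match pvScanA used (fun o => o == target) 0 options with
  | some j => some j
  | none =>
    let lower_target := PySem.Str.lower target
    match pvScanA used (fun o => PySem.Str.lower o == lower_target) 0 options with
    | some j => some j
    | none =>
      let stripped := PySem.Str.lower (PySem.Str.strip target)
      match pvScanA used (fun o => PySem.Str.lower (PySem.Str.strip o) == stripped) 0 options with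
      | some j => some j
      | none => none

-- ===== PORT B =====
-- B: one pass; early return on an exact match, otherwise keep earliest best-ranked candidate.
def pvLoopB (target lt st : String) (used : List Int) : List String → Nat → Nat → Option Int → Option Int
  | [], _, _, bestJ => bestJ
  | o :: rest, j, bestRank, bestJ =>
    if used.contains (j : Int) then pvLoopB target lt st used rest (j + 1) bestRank bestJ
    else if o == target then some (j : Int)
    else if PySem.Str.lower o == lt then
      if 2 < bestRank then pvLoopB target lt st used rest (j + 1) 2 (some (j : Int))
      else pvLoopB target lt st used rest (j + 1) bestRank bestJ
    else if PySem.Str.lower (PySem.Str.strip o) == st then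
      if 3 < bestRank then pvLoopB target lt st used rest (j + 1) 3 (some (j : Int))
      else pvLoopB target lt st used rest (j + 1) bestRank bestJ
    else pvLoopB target lt st used rest (j + 1) bestRank bestJ

def find_option_index_py_alt (target : String) (options : List String) (used : List Int) : Option Int :=
  pvLoopB target (PySem.Str.lower target) (PySem.Str.lower (PySem.Str.strip target)) used options 0 4 none

-- ===== PRECONDITION & SPEC =====
def Spec_find_option_index_py (target : String) (options : List String) (used : List Int) (out : Option Int) : Prop := out = find_option_index_py_alt target options used
instance (target : String) (options : List String) (used : List Int) (out : Option Int) : Decidable (Spec_find_option_index_py target options used out) := by unfold Spec_find_option_index_py; infer_instance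

-- ===== CLAIM (what is proved, stated in full; the proofs are below) =====
def Claim_equal_find_option_index_py : Prop := ∀ (target : String) (options : List String) (used : List Int), Dom_find_option_index_py target options used → Spec_find_option_index_py target options used (find_option_index_py target options used)

-- ===== LEMMAS AND PROOFS =====
-- Loop invariant: B's one-pass loop on a suffix equals A's tiered scans on that
-- suffix, falling back to the accumulated candidate b once the remaining tiers
-- cannot beat the accumulated rank r.
theorem pvLoopB_eq (target lt st : String) (used : List Int) :
    ∀ (rest : List String) (j r : Nat) (b : Option Int), 2 ≤ r →
    pvLoopB target lt st used rest j r b =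
      match pvScanA used (fun o => o == target) j rest with
      | some k => some k
      | none =>
        if r ≤ 2 then b else
        match pvScanA used (fun o => PySem.Str.lower o == lt) j rest with
        | some k => some k
        | none =>
          if r ≤ 3 then b else
          match pvScanA used (fun o => PySem.Str.lower (PySem.Str.strip o) == st) j rest with
          | some k => some k
          | none => b := by
  intro rest
  induction rest with
  | nil =>
    intro j r b hr
    simp only [pvLoopB, pvScanA]
    split_ifs <;> rfl
  | cons o rest ih =>
    intro j r b hr
    by_cases hu : (j : Int) ∈ used
    · simp [pvLoopB, pvScanA, hu]
      rw [ih _ _ _ hr]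
    · by_cases h1 : o = target
      · simp [pvLoopB, pvScanA, hu, h1]
      · by_cases h2 : PySem.Str.lower o = lt
        · by_cases hr2 : 2 < r
          · simp [pvLoopB, pvScanA, hu, h1, h2, hr2]
            rw [ih _ 2 _ (by omega)]
            simp
            split
            · rfl
            · simp [show ¬ r ≤ 2 by omega]
          · have hr2' : r = 2 := by omega
            subst hr2'
            simp [pvLoopB, pvScanA, hu, h1, h2, hr2]
            rw [ih _ _ _ hr]
            simp
        · by_cases h3 : PySem.Str.lower (PySem.Str.strip o) = st
          · by_cases hr3 : 3 < r
            · simp [pvLoopB, pvScanA, hu, h1, h2, h3, hr3]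
              rw [ih _ 3 _ (by omega)]
              simp [show ¬ r ≤ 2 by omega, show ¬ r ≤ 3 by omega]
            · simp [pvLoopB, pvScanA, hu, h1, h2, h3, hr3]
              rw [ih _ _ _ hr]
              have h4 : r ≤ 3 := by omega
              by_cases hr2 : r ≤ 2 <;> simp [hr2, h4]
          · simp [pvLoopB, pvScanA, hu, h1, h2, h3]
            rw [ih _ _ _ hr]

-- ===== VERDICT (by name: the statement is the Claim_ definition above) =====
theorem find_option_index_py_spec : Claim_equal_find_option_index_py := by
  intro target options used _
  unfold Spec_find_option_index_py find_option_index_py find_option_index_py_alt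
  rw [pvLoopB_eq target _ _ used options 0 4 none (by omega)]
  split
  · rfl
  · simp only [show ¬ (4:Nat) ≤ 2 by omega, show ¬ (4:Nat) ≤ 3 by omega, if_false]
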